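-- pv_equiv track=rewrite | github.com/shuiruge/LGD | lgd/finetuner.py | intend_back
-- ===== SOURCE A (Python) =====
-- def intend_back(n_intends, source):
--   new_source = ''
--   s = -1
--   for c in source[2:]:
--     if c == '\n':
--       new_source += c
--       s = 0
--     elif s >= 0 and s < n_intends:
--       s += 1
--       continue
--     else:
--       new_source += c
--       s = -1
--   return new_source
-- ===== SOURCE B (Python) =====
-- def intend_back(n_intends, source):
--     lines = source[2:].split('\n')
--     k = max(n_intends, 0)
--     return '\n'.join([lines[0]] + [line[k:] for line in lines[1:]])
-- ===== Notes on version B (the rewrite author's own statement) =====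
-- stated objective: simpler
-- what changed: Replaced the per-character state machine (accumulator string plus skip counter) with a split on newline, slicing max(n_intends,0) leading characters off each line after the first, and a join.
import Mathlib
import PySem

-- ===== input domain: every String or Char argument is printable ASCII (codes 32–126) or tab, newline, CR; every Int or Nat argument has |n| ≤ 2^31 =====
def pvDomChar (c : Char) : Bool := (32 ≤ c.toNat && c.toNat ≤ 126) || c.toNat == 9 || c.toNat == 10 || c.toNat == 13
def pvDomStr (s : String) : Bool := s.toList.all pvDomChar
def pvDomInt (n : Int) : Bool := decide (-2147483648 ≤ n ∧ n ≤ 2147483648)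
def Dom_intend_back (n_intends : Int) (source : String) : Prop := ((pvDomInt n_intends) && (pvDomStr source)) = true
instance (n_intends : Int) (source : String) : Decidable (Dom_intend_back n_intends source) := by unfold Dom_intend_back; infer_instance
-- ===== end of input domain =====

-- B replaces A's per-character state machine by split('\n') / per-line slice / join (objective: simpler).

-- ===== PORT A =====
-- new_source is the accumulated List Char, s the Int state; 'continue' just keeps the state pair.
def intend_back (n_intends : Int) (source : String) : String :=
  let r := (PySem.List.slice source.toList (some 2) none).foldl
    (fun (st : List Char × Int) c =>
      if c = '\n' then (st.1 ++ [c], 0)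
      else if 0 ≤ st.2 ∧ st.2 < n_intends then (st.1, st.2 + 1)
      else (st.1 ++ [c], -1))
    ([], -1)
  String.mk r.1

-- ===== PORT B =====
-- str.split('\n') is List.splitOn '\n' on the char list; '\n'.join is PySem.Chars.join ['\n'];
-- lines[0] is headD [] (split never returns an empty list); line[k:] with k ≥ 0 is List.drop k.
def intend_back_alt (n_intends : Int) (source : String) : String :=
  let lines := (PySem.List.slice source.toList (some 2) none).splitOn '\n'
  let k := (max n_intends 0).toNat
  String.mk (PySem.Chars.join ['\n'] (lines.headD [] :: lines.tail.map (fun line => line.drop k)))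

-- ===== PRECONDITION & SPEC =====
def Spec_intend_back (n_intends : Int) (source : String) (out : String) : Prop := out = intend_back_alt n_intends source
instance (n_intends : Int) (source : String) (out : String) : Decidable (Spec_intend_back n_intends source out) := by unfold Spec_intend_back; infer_instance

-- ===== CLAIM (what is proved, stated in full; the proofs are below) =====
def Claim_equal_intend_back : Prop := ∀ (n_intends : Int) (source : String), Dom_intend_back n_intends source → Spec_intend_back n_intends source (intend_back n_intends source)

-- ===== LEMMAS AND PROOFS =====

-- The state machine of A, as a structural recursion over the remaining characters.
def pvMach (n : Int) : Int → List Char → List Char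
  | _, [] => []
  | s, c :: cs =>
    if c = '\n' then c :: pvMach n 0 cs
    else if 0 ≤ s ∧ s < n then pvMach n (s + 1) cs
    else c :: pvMach n (-1) cs

theorem pvInter_cons_cons (sep : Char) (a b : List Char) (t : List (List Char)) :
    List.intercalate [sep] (a :: b :: t) = a ++ sep :: List.intercalate [sep] (b :: t) := by
  simp [List.intercalate]

theorem pvFold_eq (n : Int) (cs : List Char) : ∀ (acc : List Char) (s : Int),
    (cs.foldl
      (fun (st : List Char × Int) c =>
        if c = '\n' then (st.1 ++ [c], 0)
        else if 0 ≤ st.2 ∧ st.2 < n then (st.1, st.2 + 1)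
        else (st.1 ++ [c], -1))
      (acc, s)).1 = acc ++ pvMach n s cs := by
  induction cs with
  | nil => intro acc s; simp [pvMach]
  | cons c cs ih =>
    intro acc s
    by_cases hc : c = '\n'
    · simp [pvMach, hc, List.foldl_cons, ih]
    · by_cases hs : 0 ≤ s ∧ s < n
      · simp [pvMach, hc, hs, List.foldl_cons, ih]
      · simp [pvMach, hc, hs, List.foldl_cons, ih]

theorem pvMach_eq_split (n : Int) (cs : List Char) :
    (pvMach n (-1) cs =
      List.intercalate ['\n'] (((cs.splitOn '\n').headD []) ::
        (cs.splitOn '\n').tail.map (fun l => l.drop n.toNat))) ∧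
    (∀ s : Int, 0 ≤ s →
      pvMach n s cs =
        List.intercalate ['\n'] ((((cs.splitOn '\n').headD []).drop (n - s).toNat) ::
          (cs.splitOn '\n').tail.map (fun l => l.drop n.toNat))) := by
  induction cs with
  | nil => constructor <;> simp [pvMach, List.splitOn, List.splitOnP_nil, List.intercalate]
  | cons c cs ih =>
    obtain ⟨ih1, ih2⟩ := ih
    have hsplit : (c :: cs).splitOn '\n' =
        if c = '\n' then [] :: cs.splitOn '\n'
        else List.modifyHead (List.cons c) (cs.splitOn '\n') := by
      simp [List.splitOn, List.splitOnP_cons]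
    obtain ⟨h, t, hht⟩ : ∃ h t, cs.splitOn '\n' = h :: t := by
      cases hcs : cs.splitOn '\n' with
      | nil => exact absurd hcs (by simpa [List.splitOn] using List.splitOnP_ne_nil (· == '\n') cs)
      | cons h t => exact ⟨h, t, rfl⟩
    constructor
    · by_cases hc : c = '\n'
      · rw [hsplit, if_pos hc, hc]
        have := ih2 0 le_rfl
        simp only [hht] at this ⊢
        simp [pvMach, this, pvInter_cons_cons]
      · rw [hsplit, if_neg hc]
        have hs : ¬ ((0:Int) ≤ -1 ∧ (-1:Int) < n) := by omega
        simp only [hht] at ih1 ⊢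
        simp only [pvMach, if_neg hc, if_neg hs, ih1, List.modifyHead]
        cases t with
        | nil => simp [List.intercalate]
        | cons t0 ts => simp [pvInter_cons_cons]
    · intro s hs0
      by_cases hc : c = '\n'
      · rw [hsplit, if_pos hc, hc]
        have := ih2 0 le_rfl
        simp only [hht] at this ⊢
        simp [pvMach, this, pvInter_cons_cons]
      · rw [hsplit, if_neg hc]
        by_cases hs : (0:Int) ≤ s ∧ s < n
        · have := ih2 (s + 1) (by omega)
          simp only [hht] at this ⊢
          have hdrop : (c :: h).drop (n - s).toNat = h.drop (n - (s + 1)).toNat := by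
            have h1 : (n - s).toNat = (n - (s + 1)).toNat + 1 := by omega
            simp [h1]
          simp [pvMach, hc, hs, this, hdrop]
        · simp only [hht] at ih1 ⊢
          have hdrop : (c :: h).drop (n - s).toNat = c :: h := by
            have : (n - s).toNat = 0 := by omega
            simp [this]
          simp only [pvMach, if_neg hc, if_neg hs, ih1, List.modifyHead]
          cases t with
          | nil => simp [List.intercalate, hdrop]
          | cons t0 ts => simp [pvInter_cons_cons, hdrop]

-- ===== VERDICT (by name: the statement is the Claim_ definition above) =====
theorem intend_back_spec : Claim_equal_intend_back := by
  intro n source _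
  unfold Spec_intend_back intend_back intend_back_alt
  simp only []
  rw [pvFold_eq, (pvMach_eq_split n _).1]
  have hk : (max n 0).toNat = n.toNat := by omega
  simp [PySem.Chars.join, hk]
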